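-- pv_equiv track=rewrite | github.com/socialwifi/docker-watcher | docker-watcher/use_cases/docker_cases.py | _parse_log_name
-- ===== SOURCE A (Python) =====
-- def _parse_log_name(elements):
--     log_name = elements[0].strip().split(' ')
--     log_name.reverse()
--     parts = []
--     for element in log_name:
--         if not element.isnumeric():
--             parts.append(element)
--         else:
--             break
--     parts.reverse()
--     return ' '.join(parts)
-- ===== SOURCE B (Python) =====
-- def _parse_log_name(elements):
--     words = elements[0].strip().split(' ')
--     start = 0
--     for i, w in enumerate(words):
--         if w.isnumeric():
--             start = i + 1
--     return ' '.join(words[start:])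
-- ===== Notes on version B (the rewrite author's own statement) =====
-- stated objective: simpler
-- what changed: One forward pass tracking the index after the last numeric word, then a single slice/join, replacing A's reverse / collect-until-break / reverse of a parts list.
import Mathlib
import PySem

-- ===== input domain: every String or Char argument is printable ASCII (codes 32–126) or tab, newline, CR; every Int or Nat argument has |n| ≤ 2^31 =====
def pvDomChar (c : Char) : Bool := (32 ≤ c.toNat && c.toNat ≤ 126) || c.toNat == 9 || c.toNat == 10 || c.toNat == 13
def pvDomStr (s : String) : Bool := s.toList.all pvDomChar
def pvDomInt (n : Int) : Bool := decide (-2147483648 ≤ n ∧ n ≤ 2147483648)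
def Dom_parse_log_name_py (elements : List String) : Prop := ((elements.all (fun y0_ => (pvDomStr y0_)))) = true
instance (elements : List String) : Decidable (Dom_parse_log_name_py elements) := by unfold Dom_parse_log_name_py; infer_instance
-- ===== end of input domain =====

-- B changes the decomposition only: one forward pass tracking the start of the trailing
-- non-numeric run, instead of A's reverse / collect-until-break / reverse (objective: simpler).

-- ===== PORT A =====
-- A's 'for … append / break' loop over the reversed word list, with its parts accumulator.
-- isnumeric() is ported as PySem.Str.strIsdigit: exact on the ASCII domain Dom_.
def parseLoopA : List String → List String → List String
  | [], parts => parts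
  | e :: rest, parts =>
    if !(PySem.Str.strIsdigit e) then parseLoopA rest (parts ++ [e]) else parts

def parse_log_name_py (elements : List String) : String :=
  -- (pyGet? …).getD "" : Python raises IndexError on [], excluded by Pre_
  let log_name := (PySem.Str.split? (PySem.Str.strip ((PySem.List.pyGet? elements 0).getD "")) " ").getD []
  let rev := log_name.reverse
  let parts := parseLoopA rev []
  PySem.Str.join " " parts.reverse

-- ===== PORT B =====
-- Source B's enumerate loop: start := i+1 at each numeric word.
def altStart : List String → Nat → Nat → Nat
  | [], _, start => start
  | w :: rest, i, start =>
    altStart rest (i + 1) (if PySem.Str.strIsdigit w then i + 1 else start)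

def parse_log_name_py_alt (elements : List String) : String :=
  let words := (PySem.Str.split? (PySem.Str.strip ((PySem.List.pyGet? elements 0).getD "")) " ").getD []
  let start := altStart words 0 0
  -- words[start:] with start : Nat is exactly List.drop start
  PySem.Str.join " " (words.drop start)

-- ===== PRECONDITION & SPEC =====
-- Pre_ excludes only the empty list, where Python A raises IndexError (elements[0]).
def Pre_parse_log_name_py (elements : List String) : Prop := elements ≠ []
instance (elements : List String) : Decidable (Pre_parse_log_name_py elements) := by
  unfold Pre_parse_log_name_py; infer_instance

def pvWitness_parse_log_name_py : List String := ["backend 1 error log"]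

def Spec_parse_log_name_py (elements : List String) (out : String) : Prop := out = parse_log_name_py_alt elements
instance (elements : List String) (out : String) : Decidable (Spec_parse_log_name_py elements out) := by unfold Spec_parse_log_name_py; infer_instance

-- ===== CLAIM (what is proved, stated in full; the proofs are below) =====
def Claim_equal_parse_log_name_py : Prop := ∀ (elements : List String), Dom_parse_log_name_py elements → Pre_parse_log_name_py elements → Spec_parse_log_name_py elements (parse_log_name_py elements)

-- ===== LEMMAS AND PROOFS =====

theorem parseLoopA_eq_takeWhile (l parts : List String) :
    parseLoopA l parts = parts ++ l.takeWhile (fun e => !(PySem.Str.strIsdigit e)) := by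
  induction l generalizing parts with
  | nil => simp [parseLoopA]
  | cons e rest ih =>
    by_cases h : PySem.Chars.strIsdigit e.toList = true
    · simp [parseLoopA, h]
    · simp [parseLoopA, h, ih]

theorem altStart_le (l : List String) : ∀ i s : Nat, s ≤ i → altStart l i s ≤ i + l.length := by
  induction l with
  | nil => intro i s h; simp only [altStart, List.length_nil]; omega
  | cons w rest ih =>
    intro i s h
    simp only [altStart, List.length_cons]
    have : altStart rest (i + 1) (if PySem.Str.strIsdigit w then i + 1 else s) ≤ i + 1 + rest.length := by
      apply ih
      split <;> omega
    omega

theorem altStart_append (w : String) (l : List String) : ∀ i s : Nat,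
    altStart (l ++ [w]) i s =
      if PySem.Str.strIsdigit w then i + l.length + 1 else altStart l i s := by
  induction l with
  | nil => intro i s; simp [altStart]
  | cons x rest ih =>
    intro i s
    simp only [List.cons_append, altStart, ih, List.length_cons]
    split
    · omega
    · rfl

theorem drop_altStart_eq (ws : List String) :
    ws.drop (altStart ws 0 0) =
      (ws.reverse.takeWhile (fun e => !(PySem.Str.strIsdigit e))).reverse := by
  induction ws using List.reverseRecOn with
  | nil => simp [altStart]
  | append_singleton ws w ih =>
    rw [altStart_append]
    simp only [PySem.Str.strIsdigit_eq]
    by_cases h : PySem.Chars.strIsdigit w.toList = true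
    · rw [if_pos h]
      simp [h]
    · have hle : altStart ws 0 0 ≤ ws.length := by simpa using altStart_le ws 0 0 (le_refl 0)
      rw [if_neg h, List.drop_append_of_le_length hle, ih]
      simp [h]

-- ===== VERDICT (by name: the statement is the Claim_ definition above) =====
theorem parse_log_name_py_spec : Claim_equal_parse_log_name_py := by
  intro elements _ _
  unfold Spec_parse_log_name_py parse_log_name_py parse_log_name_py_alt
  simp only
  rw [parseLoopA_eq_takeWhile, List.nil_append, ← drop_altStart_eq]
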